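-- pv_equiv track=rewrite | github.com/shayne-fletcher/monarch-1 | python/monarch/monarch_dashboard/server/db.py | _parent_ranks_for_region
-- ===== SOURCE A (Python) =====
-- def _child_rank_to_parent_rank(
--     child_rank: int,
--     offset: int,
--     sizes: list[int],
--     strides: list[int],
-- ) -> int:
--     """Map a child mesh rank to a parent mesh rank via the parent Region.
--
--     A child mesh is spawned on a view (Region) of the parent mesh.  Children
--     are enumerated in row-major order over the Region.  Given the Region
--     R = (offset, sizes, strides), child rank *r* maps to::
--
--         parent_rank = offset + Σ_{k} i_k · strides_k
--
--     where (i_0, ..., i_{d-1}) is the row-major decomposition of *r* over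
--     *sizes*.  O(d) per call where d = len(sizes).
--     """
--     parent_rank = offset
--     remainder = child_rank
--     for k in range(len(sizes)):
--         suffix = 1
--         for j in range(k + 1, len(sizes)):
--             suffix *= sizes[j]
--         i_k = (remainder // suffix) % sizes[k]
--         parent_rank += i_k * strides[k]
--         remainder %= suffix
--     return parent_rank
--
-- def _parent_ranks_for_region(
--     offset: int,
--     sizes: list[int],
--     strides: list[int],
-- ) -> set[int]:
--     """Return the set of all parent mesh ranks covered by a Region.  O(|R|)."""
--     total = 1
--     for s in sizes:
--         total *= s
--     return {_child_rank_to_parent_rank(r, offset, sizes, strides) for r in range(total)}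
-- ===== SOURCE B (Python) =====
-- def _parent_ranks_for_region(
--     offset: int,
--     sizes: list[int],
--     strides: list[int],
-- ) -> set[int]:
--     """Return the set of all parent mesh ranks covered by a Region.
--
--     Built by an incremental Cartesian sum over the dimensions, O(|R|*d) total
--     instead of decomposing every child rank separately.  A region with a
--     non-positive extent in some dimension covers no ranks."""
--     if any(size <= 0 for size in sizes):
--         return set()
--     ranks = [offset]
--     for size, stride in zip(sizes, strides):
--         ranks = [r + i * stride for r in ranks for i in range(size)]
--     return set(ranks)
-- ===== Notes on version B (the rewrite author's own statement) =====
-- stated objective: faster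
-- what changed: Replaces the per-child-rank row-major decomposition (an inner suffix-product loop per dimension per rank) by one incremental Cartesian sum over the dimensions that builds all parent ranks directly.
-- intended difference: On sizes lists containing a negative entry whose total product is still positive (an even number of negatives), A decomposes ranks with negative moduli and returns an accidental nonempty set (e.g. {0,-1,-10,-11} for sizes [-2,-2]), while B naturally returns the empty set, the intended value for a region with a non-positive extent. — e.g. on _parent_ranks_for_region(0, [-1, -1], [1, 1]): A returns [0], B returns []
import Mathlib
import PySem

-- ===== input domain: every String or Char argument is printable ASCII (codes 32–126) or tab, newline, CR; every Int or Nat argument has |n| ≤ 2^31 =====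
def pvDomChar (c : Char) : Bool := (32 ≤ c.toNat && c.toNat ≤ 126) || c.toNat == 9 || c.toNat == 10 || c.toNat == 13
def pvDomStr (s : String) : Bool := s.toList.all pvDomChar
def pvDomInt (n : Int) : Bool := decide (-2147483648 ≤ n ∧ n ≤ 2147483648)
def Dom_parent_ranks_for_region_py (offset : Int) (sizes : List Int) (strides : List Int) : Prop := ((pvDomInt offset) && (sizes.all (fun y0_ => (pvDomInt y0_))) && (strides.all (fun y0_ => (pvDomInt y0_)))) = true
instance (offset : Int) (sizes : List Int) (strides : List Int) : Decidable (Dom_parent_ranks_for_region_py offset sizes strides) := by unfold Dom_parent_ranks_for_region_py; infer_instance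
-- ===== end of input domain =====

-- ===== PORT A =====
-- B replaces the per-rank row-major decomposition by one incremental Cartesian sum
-- over the dimensions (asymptotically fewer multiplications); return-value equivalence only.

-- running product `total = 1; for s in l: total *= s` (used for `total` and for `suffix`)
def pvSuffixProd (l : List Int) : Int := l.foldl (fun a s => a * s) 1

-- _child_rank_to_parent_rank: the loop `for k in range(len(sizes))` as structural recursion
-- over `sizes`, consuming `strides` in step (strides[k] with k ≥ len(strides) is a Python
-- IndexError, excluded by Pre_; headD's default is never reached there).
def pvChildToParent (parent remainder : Int) : List Int → List Int → Int
  | [], _ => parent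
  | s :: rest, strides =>
    let suffix := pvSuffixProd rest
    let i_k := PySem.Int.mod (PySem.Int.floordiv remainder suffix) s
    pvChildToParent (parent + i_k * strides.headD 0) (PySem.Int.mod remainder suffix) rest strides.tail

def parent_ranks_for_region_py (offset : Int) (sizes : List Int) (strides : List Int) : List Int :=
  let total := pvSuffixProd sizes
  PySem.Set.ofList ((PySem.List.pyRange 0 total 1).map (fun r => pvChildToParent offset r sizes strides))

-- ===== PORT B =====
-- one dimension of the Cartesian sum: ranks = [r + i*stride for r in ranks for i in range(size)]
def pvCartStep (ranks : List Int) (p : Int × Int) : List Int :=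
  ranks.flatMap (fun r => (PySem.List.pyRange 0 p.1 1).map (fun i => r + i * p.2))

def parent_ranks_for_region_py_alt (offset : Int) (sizes : List Int) (strides : List Int) : List Int :=
  if sizes.any (fun size => decide (size ≤ 0)) then []
  else PySem.Set.ofList ((sizes.zip strides).foldl pvCartStep [offset])

-- ===== PRECONDITION & SPEC =====
-- Pre_ excludes exactly the inputs on which A raises IndexError: len(strides) < len(sizes)
-- together with a positive total, which makes A's decomposition loop touch a missing stride.
def Pre_parent_ranks_for_region_py (offset : Int) (sizes : List Int) (strides : List Int) : Prop :=
  sizes.length ≤ strides.length ∨ sizes.prod ≤ 0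
instance (offset : Int) (sizes : List Int) (strides : List Int) : Decidable (Pre_parent_ranks_for_region_py offset sizes strides) := by unfold Pre_parent_ranks_for_region_py; infer_instance

def pvWitness_parent_ranks_for_region_py : Int × List Int × List Int := (0, [2, 2], [2, 1])

-- On sizes lists containing a negative entry whose total product is still positive (an even
-- number of negatives), A decomposes ranks with negative moduli and returns an accidental
-- nonempty set, while B naturally returns the empty set, the intended value for a region with
-- a non-positive extent.
def D_parent_ranks_for_region_py (offset : Int) (sizes : List Int) (strides : List Int) : Prop :=
  (∃ s ∈ sizes, s < 0) ∧ 0 < sizes.prod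
instance (offset : Int) (sizes : List Int) (strides : List Int) : Decidable (D_parent_ranks_for_region_py offset sizes strides) := by unfold D_parent_ranks_for_region_py; infer_instance

def Spec_parent_ranks_for_region_py (offset : Int) (sizes : List Int) (strides : List Int) (out : List Int) : Prop := ¬ D_parent_ranks_for_region_py offset sizes strides → out = parent_ranks_for_region_py_alt offset sizes strides
instance (offset : Int) (sizes : List Int) (strides : List Int) (out : List Int) : Decidable (Spec_parent_ranks_for_region_py offset sizes strides out) := by unfold Spec_parent_ranks_for_region_py; infer_instance

def pvDiffWitness_parent_ranks_for_region_py : Int × List Int × List Int := (0, [-1, -1], [1, 1])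
def pvDiffWitnessOut_parent_ranks_for_region_py : (List Int) × (List Int) := ([0], [])

-- ===== CLAIM (what is proved, stated in full; the proofs are below) =====
def Claim_unchanged_parent_ranks_for_region_py : Prop := ∀ (offset : Int) (sizes : List Int) (strides : List Int), Dom_parent_ranks_for_region_py offset sizes strides → Pre_parent_ranks_for_region_py offset sizes strides → Spec_parent_ranks_for_region_py offset sizes strides (parent_ranks_for_region_py offset sizes strides)
def Claim_changed_parent_ranks_for_region_py : Prop := Dom_parent_ranks_for_region_py (pvDiffWitness_parent_ranks_for_region_py.1) (pvDiffWitness_parent_ranks_for_region_py.2.1) (pvDiffWitness_parent_ranks_for_region_py.2.2) ∧ Pre_parent_ranks_for_region_py (pvDiffWitness_parent_ranks_for_region_py.1) (pvDiffWitness_parent_ranks_for_region_py.2.1) (pvDiffWitness_parent_ranks_for_region_py.2.2) ∧ D_parent_ranks_for_region_py (pvDiffWitness_parent_ranks_for_region_py.1) (pvDiffWitness_parent_ranks_for_region_py.2.1) (pvDiffWitness_parent_ranks_for_region_py.2.2) ∧ parent_ranks_for_region_py (pvDiffWitness_parent_ranks_for_region_py.1) (pvDiffWitness_parent_ranks_for_region_py.2.1)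 (pvDiffWitness_parent_ranks_for_region_py.2.2) = pvDiffWitnessOut_parent_ranks_for_region_py.1 ∧ parent_ranks_for_region_py_alt (pvDiffWitness_parent_ranks_for_region_py.1) (pvDiffWitness_parent_ranks_for_region_py.2.1) (pvDiffWitness_parent_ranks_for_region_py.2.2) = pvDiffWitnessOut_parent_ranks_for_region_py.2 ∧ pvDiffWitnessOut_parent_ranks_for_region_py.1 ≠ pvDiffWitnessOut_parent_ranks_for_region_py.2
def Claim_exact_parent_ranks_for_region_py : Prop := ∀ (offset : Int) (sizes : List Int) (strides : List Int), Dom_parent_ranks_for_region_py offset sizes strides → Pre_parent_ranks_for_region_py offset sizes strides → D_parent_ranks_for_region_py offset sizes strides → parent_ranks_for_region_py offset sizes strides ≠ parent_ranks_for_region_py_alt offset sizes strides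

-- ===== LEMMAS AND PROOFS =====

theorem pvSuffixProd_mul (l : List Int) (a : Int) : l.foldl (fun a s => a * s) a = a * pvSuffixProd l := by
  induction l generalizing a with
  | nil => simp [pvSuffixProd]
  | cons x xs ih =>
    simp only [pvSuffixProd, List.foldl_cons] at *
    rw [ih (a * x), ih (1 * x)]
    ring

theorem pvSuffixProd_cons (s : Int) (l : List Int) : pvSuffixProd (s :: l) = s * pvSuffixProd l := by
  show List.foldl (fun a s => a * s) (1 * s) l = s * pvSuffixProd l
  rw [pvSuffixProd_mul, one_mul]

theorem pvSuffixProd_eq_prod (l : List Int) : pvSuffixProd l = l.prod := by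
  rw [List.prod_eq_foldl]; rfl

theorem pvSuffixProd_nonneg (l : List Int) (h : ∀ s ∈ l, 0 ≤ s) : 0 ≤ pvSuffixProd l := by
  induction l with
  | nil => simp [pvSuffixProd]
  | cons x xs ih =>
    rw [pvSuffixProd_cons]
    exact mul_nonneg (h x (by simp)) (ih (fun s hs => h s (by simp [hs])))

-- one block of length P inside range(n*P, n*P+P): floordiv is n, mod is the offset
theorem pvBlock {α : Type} (G : Int → Int → α) (P : Int) (hP : 0 < P) (n : Int) :
    (PySem.List.pyRange (n * P) (n * P + P) 1).map
        (fun r => G (PySem.Int.floordiv r P) (PySem.Int.mod r P))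
      = (PySem.List.pyRange 0 P 1).map (fun j => G n j) := by
  rw [PySem.List.pyRange_one (n * P) (n * P + P), PySem.List.pyRange_one 0 P]
  have h1 : (n * P + P - n * P) = P := by ring
  rw [h1]
  simp only [List.map_map, Int.sub_zero]
  apply List.map_congr_left
  intro k hk
  have hk' : (k : Int) < P := by
    have := List.mem_range.mp hk
    omega
  have hdiv : PySem.Int.floordiv (n * P + (k : Int)) P = n := by
    rw [PySem.Int.floordiv_eq_ediv_of_pos hP]
    rw [add_comm]
    rw [Int.add_mul_ediv_right (k : Int) n (by omega : P ≠ 0)]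
    rw [Int.ediv_eq_zero_of_lt (by positivity) hk']
    ring
  have hmod : PySem.Int.mod (n * P + (k : Int)) P = (k : Int) := by
    rw [PySem.Int.mod_eq_emod_of_pos hP]
    rw [add_comm, Int.add_mul_emod_self_right]
    exact Int.emod_eq_of_lt (by positivity) hk'
  simp only [Function.comp_apply, hdiv, hmod, zero_add]

-- range(s*P) split into s blocks of length P (Nat-indexed outer bound)
theorem pvRangeSplit {α : Type} (G : Int → Int → α) (P : Int) (hP : 0 < P) : ∀ (n : Nat),
    (PySem.List.pyRange 0 ((n : Int) * P) 1).map
        (fun r => G (PySem.Int.floordiv r P) (PySem.Int.mod r P))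
      = (PySem.List.pyRange 0 (n : Int) 1).flatMap
          (fun i => (PySem.List.pyRange 0 P 1).map (fun j => G i j)) := by
  intro n
  induction n with
  | zero => simp [PySem.List.pyRange_one_eq_nil]
  | succ n ih =>
    have hcast : (((n + 1 : Nat)) : Int) = (n : Int) + 1 := by push_cast; ring
    have h1 : (0 : Int) ≤ (n : Int) * P := by positivity
    have h2 : ((n : Int) + 1) * P = (n : Int) * P + P := by ring
    rw [hcast, PySem.List.pyRange_one_append 0 ((n : Int) * P) (((n : Int) + 1) * P) h1 (by nlinarith),
        List.map_append, ih,
        PySem.List.pyRange_one_succ_right (by positivity : (0 : Int) ≤ (n : Int)),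
        List.flatMap_append]
    congr 1
    · simp only [List.flatMap_cons, List.flatMap_nil, List.append_nil]
      rw [h2]
      exact pvBlock G P hP (n : Int)

-- range(s*P) split, with the outer mod s that A computes (a no-op on this range)
theorem pvRangeSplitMod {α : Type} (G : Int → Int → α) (s P : Int) (hs : 0 ≤ s) (hP : 0 ≤ P) :
    (PySem.List.pyRange 0 (s * P) 1).map
        (fun r => G (PySem.Int.mod (PySem.Int.floordiv r P) s) (PySem.Int.mod r P))
      = (PySem.List.pyRange 0 s 1).flatMap
          (fun i => (PySem.List.pyRange 0 P 1).map (fun j => G i j)) := by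
  rcases lt_or_eq_of_le hP with hP | hP
  · have hdrop : (PySem.List.pyRange 0 (s * P) 1).map
        (fun r => G (PySem.Int.mod (PySem.Int.floordiv r P) s) (PySem.Int.mod r P))
      = (PySem.List.pyRange 0 (s * P) 1).map
        (fun r => G (PySem.Int.floordiv r P) (PySem.Int.mod r P)) := by
      apply List.map_congr_left
      intro r hr
      have hb := (PySem.List.mem_pyRange_one).mp hr
      have hq0 : 0 ≤ PySem.Int.floordiv r P := by
        rw [PySem.Int.floordiv_eq_ediv_of_pos hP]
        exact Int.ediv_nonneg hb.1 (le_of_lt hP)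
      have hqs : PySem.Int.floordiv r P < s := by
        rw [PySem.Int.floordiv_eq_ediv_of_pos hP]
        apply Int.ediv_lt_of_lt_mul hP
        omega
      have hspos : 0 < s := by omega
      rw [PySem.Int.mod_eq_emod_of_pos hspos, Int.emod_eq_of_lt hq0 hqs]
    rw [hdrop]
    have hsn : s = ((s.toNat : Nat) : Int) := by omega
    rw [hsn]
    exact pvRangeSplit G P hP s.toNat
  · rw [← hP]
    simp [PySem.List.pyRange_one_eq_nil]

-- the incremental Cartesian sum enumerates exactly A's per-rank decompositions, in order
theorem pvCart_eq (sizes : List Int) : ∀ (strides seeds : List Int),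
    (∀ s ∈ sizes, 0 ≤ s) → sizes.length ≤ strides.length →
    (sizes.zip strides).foldl pvCartStep seeds
      = seeds.flatMap (fun o =>
          (PySem.List.pyRange 0 (pvSuffixProd sizes) 1).map
            (fun r => pvChildToParent o r sizes strides)) := by
  induction sizes with
  | nil =>
    intro strides seeds _ _
    have : pvSuffixProd [] = 1 := rfl
    rw [List.zip_nil_left, List.foldl_nil, this]
    have hr : PySem.List.pyRange 0 1 1 = [0] := by decide
    rw [hr]
    simp [pvChildToParent]
  | cons s rest ih =>
    intro strides seeds hnn hlen
    cases strides with
    | nil => simp at hlen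
    | cons t ts =>
      have hs : 0 ≤ s := hnn s (by simp)
      have hP : 0 ≤ pvSuffixProd rest :=
        pvSuffixProd_nonneg rest (fun x hx => hnn x (by simp [hx]))
      simp only [List.zip_cons_cons, List.foldl_cons]
      rw [ih ts (pvCartStep seeds (s, t)) (fun x hx => hnn x (by simp [hx])) (by simpa using hlen)]
      simp only [pvCartStep, List.flatMap_assoc, List.flatMap_map]
      apply List.flatMap_congr
      intro o _
      rw [pvSuffixProd_cons]
      have hbody : (fun r => pvChildToParent o r (s :: rest) (t :: ts))
          = (fun r => pvChildToParent
              (o + PySem.Int.mod (PySem.Int.floordiv r (pvSuffixProd rest)) s * t)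
              (PySem.Int.mod r (pvSuffixProd rest)) rest ts) := by
        funext r
        simp [pvChildToParent]
      rw [hbody]
      exact (pvRangeSplitMod
        (fun i j => pvChildToParent (o + i * t) j rest ts)
        s (pvSuffixProd rest) hs hP).symm

-- ===== VERDICT (by name: the statement is the Claim_ definition above) =====
theorem parent_ranks_for_region_py_spec : Claim_unchanged_parent_ranks_for_region_py := by
  intro offset sizes strides _ hpre hnD
  have hA : parent_ranks_for_region_py offset sizes strides
      = PySem.Set.ofList ((PySem.List.pyRange 0 (pvSuffixProd sizes) 1).map
          (fun r => pvChildToParent offset r sizes strides)) := rfl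
  by_cases hpos : ∀ s ∈ sizes, 0 < s
  · have hguard : sizes.any (fun size => decide (size ≤ 0)) = false := by
      simp only [List.any_eq_false, decide_eq_true_eq, not_le]
      exact hpos
    have hlen : sizes.length ≤ strides.length := by
      rcases hpre with h | h
      · exact h
      · exact absurd (List.prod_pos hpos) (by omega)
    unfold parent_ranks_for_region_py_alt
    rw [hguard]
    simp only [Bool.false_eq_true, if_false]
    rw [pvCart_eq sizes strides [offset] (fun s hs => le_of_lt (hpos s hs)) hlen, hA]
    simp
  · have hz : ∃ s ∈ sizes, s ≤ 0 := by
      push Not at hpos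
      rcases hpos with ⟨x, hx, hx'⟩
      exact ⟨x, hx, by omega⟩
    have hprod : sizes.prod ≤ 0 := by
      rcases hz with ⟨x, hx, hx'⟩
      rcases lt_or_eq_of_le hx' with hlt | heq
      · by_contra h
        exact hnD ⟨⟨x, hx, hlt⟩, by omega⟩
      · have : (0 : Int) ∈ sizes := heq ▸ hx
        rw [List.prod_eq_zero this]
    have hguard : sizes.any (fun size => decide (size ≤ 0)) = true := by
      rcases hz with ⟨x, hx, hx'⟩
      exact List.any_eq_true.mpr ⟨x, hx, by simpa using hx'⟩
    unfold parent_ranks_for_region_py_alt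
    rw [hguard, if_pos rfl, hA]
    rw [PySem.List.pyRange_one_eq_nil (by rw [pvSuffixProd_eq_prod]; omega)]
    rfl

theorem parent_ranks_for_region_py_changed : Claim_changed_parent_ranks_for_region_py := by
  unfold Claim_changed_parent_ranks_for_region_py; decide

theorem parent_ranks_for_region_py_tight : Claim_exact_parent_ranks_for_region_py := by
  intro offset sizes strides _ _ hD
  rcases hD with ⟨⟨x, hx, hxneg⟩, hprod⟩
  have hA : parent_ranks_for_region_py offset sizes strides
      = PySem.Set.ofList ((PySem.List.pyRange 0 (pvSuffixProd sizes) 1).map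
          (fun r => pvChildToParent offset r sizes strides)) := rfl
  have hguard : sizes.any (fun size => decide (size ≤ 0)) = true :=
    List.any_eq_true.mpr ⟨x, hx, by simp; omega⟩
  unfold parent_ranks_for_region_py_alt
  rw [hguard, if_pos rfl, hA]
  rw [PySem.List.pyRange_one_cons (by rw [pvSuffixProd_eq_prod]; omega : (0 : Int) < pvSuffixProd sizes)]
  simp [PySem.Set.ofList_cons]
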